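-- pv_equiv track=rewrite | github.com/Chiragj2003/leet-code-python- | String/893_SpecialGroups.py | numSpecialEquivGroups
-- ===== SOURCE A (Python) =====
-- def numSpecialEquivGroups(words):
--     """
--     Use sorted even/odd chars as signature
--     Time: O(n * k log k), Space: O(n*k)
--     where n=len(words), k=max word length
--
--     Two strings are equivalent if they have same sorted even/odd chars.
--     """
--     def signature(word):
--         even = ''.join(sorted(word[0::2]))
--         odd = ''.join(sorted(word[1::2]))
--         return (even, odd)
--
--     groups = set()
--     for word in words:
--         groups.add(signature(word))
--
--     return len(groups)
-- ===== SOURCE B (Python) =====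
-- def numSpecialEquivGroups(words):
--     """Sort the even/odd signatures and count distinct values in one adjacent-comparison pass."""
--     sigs = sorted(
--         "".join(sorted(w[0::2])) + "\x00" + "".join(sorted(w[1::2]))
--         for w in words
--     )
--     count = 0
--     prev = None
--     for s in sigs:
--         if s != prev:
--             count += 1
--             prev = s
--     return count
-- ===== Notes on version B (the rewrite author's own statement) =====
-- stated objective: alternative
-- what changed: B replaces A's hash-set of even/odd signature tuples by building the list of signatures (joined around a '\x00' separator), sorting it, and counting distinct values in one adjacent-comparison pass.
import Mathlib
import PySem

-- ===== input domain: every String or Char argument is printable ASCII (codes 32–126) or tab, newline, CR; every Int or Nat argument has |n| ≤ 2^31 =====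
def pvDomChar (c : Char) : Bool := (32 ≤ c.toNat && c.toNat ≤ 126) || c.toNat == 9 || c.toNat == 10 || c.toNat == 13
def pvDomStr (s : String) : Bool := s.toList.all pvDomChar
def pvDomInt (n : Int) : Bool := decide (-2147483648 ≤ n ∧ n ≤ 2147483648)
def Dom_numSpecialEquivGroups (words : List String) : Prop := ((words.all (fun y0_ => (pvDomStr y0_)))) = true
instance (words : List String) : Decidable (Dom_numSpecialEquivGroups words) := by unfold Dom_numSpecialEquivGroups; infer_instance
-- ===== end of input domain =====

-- B replaces A's hash-set of signatures by sorting the signature list and counting distinct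
-- values in one adjacent-comparison pass (objective: alternative algorithm, same results).

-- ===== PORT A =====
-- signature(word): even/odd-position chars, each sorted and joined back to a string.
-- word[0::2] / word[1::2] are ported with PySem.List.slice? on the char list (step 2 ≠ 0, so
-- slice? is always `some`; `.getD []` never takes its default); ''.join(sorted(…)) is
-- String.ofList of the sorted char list (exact).
def pvSigA (word : String) : String × String :=
  let even := String.ofList
    (PySem.List.sorted ((PySem.List.slice? word.toList (some 0) none 2).getD []) (fun c => c) false)
  let odd := String.ofList
    (PySem.List.sorted ((PySem.List.slice? word.toList (some 1) none 2).getD []) (fun c => c) false)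
  (even, odd)

def numSpecialEquivGroups (words : List String) : Int :=
  let groups := words.foldl (fun g w => PySem.Set.add g (pvSigA w)) PySem.Set.empty
  PySem.Set.len groups

-- ===== PORT B =====
-- B's signature: the same sorted even/odd char strings, concatenated around a '\x00'
-- separator; the string concatenation is ported at the char-list level (exact).
def pvSigB (word : String) : String :=
  String.ofList
    (PySem.List.sorted ((PySem.List.slice? word.toList (some 0) none 2).getD []) (fun c => c) false
      ++ Char.ofNat 0 ::
        PySem.List.sorted ((PySem.List.slice? word.toList (some 1) none 2).getD []) (fun c => c) false)

def numSpecialEquivGroups_alt (words : List String) : Int :=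
  let sigs := PySem.List.sorted (words.map pvSigB) (fun s => s) false
  (sigs.foldl
    (fun (acc : Int × Option String) s =>
      if some s ≠ acc.2 then (acc.1 + 1, some s) else acc)
    ((0 : Int), (none : Option String))).1

-- ===== PRECONDITION & SPEC =====
def Spec_numSpecialEquivGroups (words : List String) (out : Int) : Prop := out = numSpecialEquivGroups_alt words
instance (words : List String) (out : Int) : Decidable (Spec_numSpecialEquivGroups words out) := by unfold Spec_numSpecialEquivGroups; infer_instance

-- ===== CLAIM (what is proved, stated in full; the proofs are below) =====
def Claim_equal_numSpecialEquivGroups : Prop := ∀ (words : List String), Dom_numSpecialEquivGroups words → Spec_numSpecialEquivGroups words (numSpecialEquivGroups words)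

-- ===== LEMMAS AND PROOFS =====

-- membership through a slice
theorem pv_mem_slice_getD {α : Type} {x : α} (xs : List α) (a b : Option Int) (st : Int)
    (h : x ∈ (PySem.List.slice? xs a b st).getD []) : x ∈ xs := by
  unfold PySem.List.slice? at h
  split at h
  · simp at h
  · simp only [Option.getD_some, List.mem_filterMap] at h
    obtain ⟨k, -, hk⟩ := h
    exact List.mem_of_getElem? hk

-- splitting at a separator char absent from both left parts is injective
theorem pv_append_cons_inj {c : Char} :
    ∀ (l1 l2 r1 r2 : List Char), c ∉ l1 → c ∉ l2 →
      l1 ++ c :: r1 = l2 ++ c :: r2 → l1 = l2 ∧ r1 = r2 := by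
  intro l1
  induction l1 with
  | nil =>
    intro l2 r1 r2 _ h2 he
    cases l2 with
    | nil => simpa using he
    | cons y t =>
      simp only [List.nil_append, List.cons_append, List.cons.injEq] at he
      exact absurd (he.1 ▸ List.mem_cons_self) h2
  | cons x t ih =>
    intro l2 r1 r2 h1 h2 he
    cases l2 with
    | nil =>
      simp only [List.nil_append, List.cons_append, List.cons.injEq] at he
      exact absurd (he.1 ▸ List.mem_cons_self) h1
    | cons y t2 =>
      simp only [List.cons_append, List.cons.injEq] at he
      obtain ⟨hxy, he2⟩ := he
      obtain ⟨ht, hr⟩ := ih t2 r1 r2 (fun h => h1 (List.mem_cons_of_mem _ h))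
        (fun h => h2 (List.mem_cons_of_mem _ h)) he2
      exact ⟨by rw [hxy, ht], hr⟩

-- the scan count, functionally
def pvScan (p : Option String) : List String → Nat
  | [] => 0
  | x :: xs => (if some x ≠ p then 1 else 0) + pvScan (some x) xs

theorem pv_foldl_scan : ∀ (l : List String) (c : Int) (p : Option String),
    (l.foldl (fun (acc : Int × Option String) s =>
      if some s ≠ acc.2 then (acc.1 + 1, some s) else acc) (c, p)).1 = c + pvScan p l := by
  intro l
  induction l with
  | nil => intro c p; simp [pvScan]
  | cons x xs ih =>
    intro c p
    simp only [List.foldl_cons]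
    by_cases h : some x = p
    · rw [if_neg (by simp [h]), ih]
      simp [pvScan, h]
    · rw [if_pos (by simp [h]), ih]
      simp only [pvScan, if_pos (by simp [h] : some x ≠ p)]
      push_cast
      ring

theorem pv_scan_some : ∀ (l : List String), l.Pairwise (· ≤ ·) →
    ∀ p : String, (∀ y ∈ l, p ≤ y) → pvScan (some p) l = (l.toFinset \ {p}).card := by
  intro l
  induction l with
  | nil => intro _ p _; simp [pvScan]
  | cons x xs ih =>
    intro hpw p hp
    have hxs : ∀ y ∈ xs, x ≤ y := fun y hy => (List.pairwise_cons.mp hpw).1 y hy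
    have hrec := ih (List.pairwise_cons.mp hpw).2 x hxs
    by_cases hx : x = p
    · subst hx
      have hset : (x :: xs).toFinset \ {x} = xs.toFinset \ {x} := by
        ext z
        simp only [List.toFinset_cons, Finset.mem_sdiff, Finset.mem_insert,
          Finset.mem_singleton, List.mem_toFinset]
        constructor
        · rintro ⟨h | h, hz⟩
          · exact absurd h hz
          · exact ⟨h, hz⟩
        · rintro ⟨h, hz⟩
          exact ⟨Or.inr h, hz⟩
      rw [pvScan, hrec, hset]
      simp
    · have hplt : p < x := lt_of_le_of_ne (hp x List.mem_cons_self) (fun h => hx h.symm)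
      have hpnot : p ∉ (x :: xs).toFinset := by
        simp only [List.mem_toFinset, List.mem_cons]
        rintro (h | h)
        · exact absurd h (ne_of_lt hplt)
        · exact absurd (hxs p h) (not_le_of_gt hplt)
      rw [Finset.sdiff_eq_self_of_disjoint (by simpa using hpnot)]
      simp only [pvScan, ne_eq, Option.some.injEq, if_pos (fun h => hx h), hrec]
      have : (x :: xs).toFinset = insert x (xs.toFinset \ {x}) := by
        ext z
        simp only [List.toFinset_cons, Finset.mem_insert, Finset.mem_sdiff,
          Finset.mem_singleton, List.mem_toFinset]
        constructor
        · rintro (h | h)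
          · exact Or.inl h
          · by_cases hzx : z = x
            · exact Or.inl hzx
            · exact Or.inr ⟨h, hzx⟩
        · rintro (h | h)
          · exact Or.inl h
          · exact Or.inr h.1
      rw [this, Finset.card_insert_of_notMem (by simp)]
      omega

theorem pv_scan_none (l : List String) (h : l.Pairwise (· ≤ ·)) :
    pvScan none l = l.toFinset.card := by
  cases l with
  | nil => simp [pvScan]
  | cons x xs =>
    have hxs : ∀ y ∈ xs, x ≤ y := fun y hy => (List.pairwise_cons.mp h).1 y hy
    simp only [pvScan, ne_eq, reduceCtorEq, not_false_eq_true, if_pos trivial]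
    rw [pv_scan_some xs (List.pairwise_cons.mp h).2 x hxs]
    have : (x :: xs).toFinset = insert x (xs.toFinset \ {x}) := by
      ext z
      simp only [List.toFinset_cons, Finset.mem_insert, Finset.mem_sdiff,
        Finset.mem_singleton, List.mem_toFinset]
      constructor
      · rintro (h | h)
        · exact Or.inl h
        · by_cases hzx : z = x
          · exact Or.inl hzx
          · exact Or.inr ⟨h, hzx⟩
      · rintro (h | h)
        · exact Or.inl h
        · exact Or.inr h.1
    rw [this, Finset.card_insert_of_notMem (by simp)]
    omega

-- PySem set length as a Finset cardinality
theorem pv_setlen_eq_card {α : Type} [BEq α] [LawfulBEq α] [DecidableEq α] (L : List α) :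
    PySem.Set.len (PySem.Set.ofList L) = (L.toFinset.card : Int) := by
  have hnd := PySem.Set.nodup_ofList (α := α) L
  have hm : (PySem.Set.ofList L).toFinset = L.toFinset := by
    ext z; simp [PySem.Set.mem_ofList]
  have := List.toFinset_card_of_nodup hnd
  simp only [PySem.Set.len]
  rw [← hm, this]

-- '\x00' never occurs in the even/odd parts of a Dom word
theorem pv_sep_not_mem (w : String) (hw : pvDomStr w = true) (a : Option Int) :
    Char.ofNat 0 ∉
      PySem.List.sorted ((PySem.List.slice? w.toList a none 2).getD []) (fun c => c) false := by
  intro hmem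
  have hmem' := (PySem.List.mem_sorted _ _ _ _).mp hmem
  have hw' := pv_mem_slice_getD _ _ _ _ hmem'
  have := (List.all_eq_true.mp hw) _ hw'
  simp [pvDomChar] at this

-- B's signature string is A's signature pair joined around the separator
def pvEncode (p : String × String) : String :=
  String.ofList (p.1.toList ++ Char.ofNat 0 :: p.2.toList)

theorem pv_map_sigB_eq (words : List String) :
    words.map pvSigB = (words.map pvSigA).map pvEncode := by
  rw [List.map_map]
  apply List.map_congr_left
  intro w _
  simp [pvSigB, pvSigA, pvEncode, String.toList_ofList]

theorem pv_toFinset_map {α β : Type} [DecidableEq α] [DecidableEq β] (l : List α) (f : α → β) :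
    (l.map f).toFinset = l.toFinset.image f := by
  ext z
  simp [List.mem_map, Finset.mem_image]

theorem pv_encode_injOn (words : List String) (hdom : Dom_numSpecialEquivGroups words) :
    Set.InjOn pvEncode ↑(words.map pvSigA).toFinset := by
  intro p hp q hq heq
  obtain ⟨w1, hw1, hp1⟩ := List.mem_map.mp (List.mem_toFinset.mp hp)
  obtain ⟨w2, hw2, hq1⟩ := List.mem_map.mp (List.mem_toFinset.mp hq)
  have hd1 := (List.all_eq_true.mp hdom) _ hw1
  have hd2 := (List.all_eq_true.mp hdom) _ hw2
  have hl : p.1.toList ++ Char.ofNat 0 :: p.2.toList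
      = q.1.toList ++ Char.ofNat 0 :: q.2.toList := by
    have := congrArg String.toList heq
    simpa [pvEncode, String.toList_ofList] using this
  have hnp : Char.ofNat 0 ∉ p.1.toList := by
    rw [← hp1]; simp only [pvSigA, String.toList_ofList]
    exact pv_sep_not_mem w1 hd1 (some 0)
  have hnq : Char.ofNat 0 ∉ q.1.toList := by
    rw [← hq1]; simp only [pvSigA, String.toList_ofList]
    exact pv_sep_not_mem w2 hd2 (some 0)
  obtain ⟨h1, h2⟩ := pv_append_cons_inj _ _ _ _ hnp hnq hl
  have e1 : p.1 = q.1 := by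
    have := congrArg String.ofList h1
    simpa [String.ofList_toList] using this
  have e2 : p.2 = q.2 := by
    have := congrArg String.ofList h2
    simpa [String.ofList_toList] using this
  exact Prod.ext e1 e2

-- ===== VERDICT (by name: the statement is the Claim_ definition above) =====
theorem numSpecialEquivGroups_spec : Claim_equal_numSpecialEquivGroups := by
  intro words hdom
  unfold Spec_numSpecialEquivGroups numSpecialEquivGroups numSpecialEquivGroups_alt
  dsimp only
  -- A's fold is Set.ofList of the mapped signatures
  have hA : words.foldl (fun g w => PySem.Set.add g (pvSigA w)) PySem.Set.empty
      = PySem.Set.ofList (words.map pvSigA) := by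
    rw [PySem.Set.ofList_eq_foldl, List.foldl_map]
    rfl
  rw [hA, pv_setlen_eq_card]
  -- B's scan over the sorted signature list counts its distinct values
  have hpw := PySem.List.sorted_pairwise (words.map pvSigB) (fun s => s)
  rw [pv_foldl_scan, pv_scan_none _ hpw,
    List.toFinset_eq_of_perm _ _ (PySem.List.sorted_perm (words.map pvSigB) _ _)]
  -- distinct tuple signatures correspond to distinct separator-joined strings
  rw [pv_map_sigB_eq, pv_toFinset_map (words.map pvSigA) pvEncode,
    Finset.card_image_of_injOn (pv_encode_injOn words hdom)]
  omega
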